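-- pv_equiv track=rewrite | github.com/tylervasse/Genetic-Algorithm-Probe-Design | genetic_algorithm.py | compute_segment_alignment_penalty
-- ===== SOURCE A (Python) =====
-- def compute_segment_alignment_penalty(desired_structure_str,
--                                       desired_align_str,
--                                       current_align_str,
--                                       segment_ranges):
--     """
--     Treat each fine-tuned structural segment as a 'meta-base' and penalize
--     mismatches between desired and current structures inside those segments.
--
--     - desired_structure_str: original desired dot-bracket (no gaps)
--     - desired_align_str: aligned desired structure from aligner2 (with '-')
--     - current_align_str: aligned current structure from aligner2 (with '-')
--     - segment_ranges: list of (start, end) indices in ORIGINAL coordinates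
--                       (0-based, end exclusive), e.g. from find_fully_enclosed_segments.
--
--     Returns:
--         segment_penalty (non-negative int): number of mismatched positions inside
--         the structural segments.
--     """
--     if not segment_ranges:
--         return 0
--
--     n = len(desired_structure_str)
--     # Map each original desired index -> list of aligned indices
--     orig_to_aligned = [[] for _ in range(n)]
--     orig_idx = 0
--     for ai, ch in enumerate(desired_align_str):
--         if ch == "-":
--             continue
--         if orig_idx < n:
--             orig_to_aligned[orig_idx].append(ai)
--             orig_idx += 1
--         else:
--             break
--
--     mismatches = 0
--     for (start, end) in segment_ranges:
--         # Safety clipping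
--         start = max(0, start)
--         end   = min(n, end)
--         for orig in range(start, end):
--             for ai in orig_to_aligned[orig]:
--                 if ai >= len(current_align_str):
--                     continue
--                 if desired_align_str[ai] != current_align_str[ai]:
--                     mismatches += 1
--
--     return mismatches
-- ===== SOURCE B (Python) =====
-- def compute_segment_alignment_penalty(desired_structure_str,
--                                       desired_align_str,
--                                       current_align_str,
--                                       segment_ranges):
--     # One aligned-string pass over a precomputed per-index coverage table,
--     # instead of an orig->aligned index map plus nested range loops.
--     if not segment_ranges:
--         return 0
--     n = len(desired_structure_str)
--     coverage = [0] * n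
--     for start, end in segment_ranges:
--         for orig in range(max(0, start), min(n, end)):
--             coverage[orig] += 1
--     total = 0
--     orig_idx = 0
--     cur_len = len(current_align_str)
--     for ai, ch in enumerate(desired_align_str):
--         if ch == "-":
--             continue
--         if orig_idx >= n:
--             break
--         if ai < cur_len and ch != current_align_str[ai]:
--             total += coverage[orig_idx]
--         orig_idx += 1
--     return total
-- ===== Notes on version B (the rewrite author's own statement) =====
-- stated objective: alternative
-- what changed: Replaces A's orig->aligned-index table of per-index Python lists and triple-nested range loops with a flat per-original-index coverage-count array plus a single pass over the aligned string that adds the coverage count at each mismatching non-gap position.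
import Mathlib
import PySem

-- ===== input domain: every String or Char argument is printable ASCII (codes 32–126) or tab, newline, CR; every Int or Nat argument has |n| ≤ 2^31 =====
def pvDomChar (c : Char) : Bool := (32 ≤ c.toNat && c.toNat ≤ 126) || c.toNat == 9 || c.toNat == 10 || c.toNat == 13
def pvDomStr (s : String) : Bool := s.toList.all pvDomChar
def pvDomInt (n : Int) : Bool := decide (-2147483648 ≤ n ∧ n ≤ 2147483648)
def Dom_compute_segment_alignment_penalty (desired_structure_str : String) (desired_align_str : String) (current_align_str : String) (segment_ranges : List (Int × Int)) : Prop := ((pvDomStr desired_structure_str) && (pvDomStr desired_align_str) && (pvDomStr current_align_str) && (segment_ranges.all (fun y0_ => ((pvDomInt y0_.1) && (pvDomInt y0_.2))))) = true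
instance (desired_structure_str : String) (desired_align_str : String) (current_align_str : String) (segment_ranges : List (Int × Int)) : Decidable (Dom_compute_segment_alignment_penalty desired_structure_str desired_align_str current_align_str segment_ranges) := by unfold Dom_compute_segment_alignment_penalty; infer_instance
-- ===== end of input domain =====

-- B replaces A's orig→aligned-index table and nested range loops by a coverage-count
-- array plus one pass over the aligned string (alternative decomposition, same cost).

-- ===== PORT A =====
def compute_segment_alignment_penalty (desired_structure_str : String) (desired_align_str : String) (current_align_str : String) (segment_ranges : List (Int × Int)) : Int :=
  if segment_ranges = [] then 0
  else
    let n := desired_structure_str.toList.length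
    let dl := desired_align_str.toList
    let cl := current_align_str.toList
    -- orig_to_aligned built by one pass over enumerate(desired_align_str)
    let tbl := ((PySem.List.enumerate dl 0).foldl
        (fun (st : List (List Int) × Nat) p =>
          if p.2 = '-' then st
          else if st.2 < n then (st.1.set st.2 (st.1.getD st.2 [] ++ [p.1]), st.2 + 1)
          else st)
        (List.replicate n ([] : List Int), 0)).1
    segment_ranges.foldl (fun mismatches r =>
      (PySem.List.pyRange (max 0 r.1) (min (n : Int) r.2) 1).foldl
        (fun mism orig =>
          (tbl.getD orig.toNat []).foldl
            (fun m ai =>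
              if (cl.length : Int) ≤ ai then m
              else if PySem.List.pyGetD dl ai ' ' ≠ PySem.List.pyGetD cl ai ' ' then m + 1
              else m)
            mism)
        mismatches) 0

-- ===== PORT B =====
def compute_segment_alignment_penalty_alt (desired_structure_str : String) (desired_align_str : String) (current_align_str : String) (segment_ranges : List (Int × Int)) : Int :=
  if segment_ranges = [] then 0
  else
    let n := desired_structure_str.toList.length
    let dl := desired_align_str.toList
    let cl := current_align_str.toList
    -- coverage counts over original indices
    let coverage := segment_ranges.foldl (fun cov r =>
        (PySem.List.pyRange (max 0 r.1) (min (n : Int) r.2) 1).foldl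
          (fun c orig => c.set orig.toNat (c.getD orig.toNat 0 + 1)) cov)
      (List.replicate n (0 : Int))
    -- single pass over enumerate(desired_align_str); Python's `break` once
    -- orig_idx ≥ n is modelled by the state staying frozen from then on
    ((PySem.List.enumerate dl 0).foldl
      (fun (st : Int × Nat) p =>
        if p.2 = '-' then st
        else if n ≤ st.2 then st
        else if p.1 < (cl.length : Int) ∧ p.2 ≠ PySem.List.pyGetD cl p.1 ' '
             then (st.1 + coverage.getD st.2 0, st.2 + 1)
             else (st.1, st.2 + 1))
      ((0 : Int), (0 : Nat))).1

-- ===== PRECONDITION & SPEC =====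
def Spec_compute_segment_alignment_penalty (desired_structure_str : String) (desired_align_str : String) (current_align_str : String) (segment_ranges : List (Int × Int)) (out : Int) : Prop := out = compute_segment_alignment_penalty_alt desired_structure_str desired_align_str current_align_str segment_ranges
instance (desired_structure_str : String) (desired_align_str : String) (current_align_str : String) (segment_ranges : List (Int × Int)) (out : Int) : Decidable (Spec_compute_segment_alignment_penalty desired_structure_str desired_align_str current_align_str segment_ranges out) := by unfold Spec_compute_segment_alignment_penalty; infer_instance

-- ===== CLAIM (what is proved, stated in full; the proofs are below) =====
def Claim_equal_compute_segment_alignment_penalty : Prop := ∀ (desired_structure_str : String) (desired_align_str : String) (current_align_str : String) (segment_ranges : List (Int × Int)), Dom_compute_segment_alignment_penalty desired_structure_str desired_align_str current_align_str segment_ranges → Spec_compute_segment_alignment_penalty desired_structure_str desired_align_str current_align_str segment_ranges (compute_segment_alignment_penalty desired_structure_str desired_align_str current_align_str segment_ranges)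

-- ===== LEMMAS AND PROOFS =====

-- non-gap (index, char) pairs, in order
def ngP (ps : List (Int × Char)) : List (Int × Char) :=
  ps.filterMap (fun p => if p.2 = '-' then none else some p)

-- the mismatch indicator at aligned index ai (A's inner test)
def indA (dl cl : List Char) (ai : Int) : Int :=
  if (cl.length : Int) ≤ ai then 0
  else if PySem.List.pyGetD dl ai ' ' ≠ PySem.List.pyGetD cl ai ' ' then 1 else 0

-- mismatch weight of original index j
def gOf (dl cl : List Char) (j : Nat) : Int :=
  ((ngP (PySem.List.enumerate dl 0))[j]?).elim 0 (fun p => indA dl cl p.1)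

theorem ngP_cons_gap (p : Int × Char) (ps : List (Int × Char)) (h : p.2 = '-') :
    ngP (p :: ps) = ngP ps := by simp [ngP, h]

theorem ngP_cons_nongap (p : Int × Char) (ps : List (Int × Char)) (h : p.2 ≠ '-') :
    ngP (p :: ps) = p :: ngP ps := by simp [ngP, h]

theorem mem_ngP {p : Int × Char} {ps : List (Int × Char)} (h : p ∈ ngP ps) : p ∈ ps := by
  rcases List.mem_filterMap.mp h with ⟨q, hq, hqe⟩
  by_cases hg : q.2 = '-' <;> simp [hg] at hqe
  exact hqe ▸ hq

theorem pyGetD_enumerate {dl : List Char} {p : Int × Char}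
    (h : p ∈ PySem.List.enumerate dl 0) : PySem.List.pyGetD dl p.1 ' ' = p.2 := by
  rcases (PySem.List.mem_enumerate_iff _ _ _).mp h with ⟨k, hk, rfl⟩
  simp [PySem.List.pyGetD_natCast, List.getD_eq_getElem?_getD, hk]

-- characterization of A's table-building fold
theorem tblA_char (n : Nat) :
    ∀ (ps : List (Int × Char)) (tbl : List (List Int)) (k : Nat),
    tbl.length = n → k ≤ n → (∀ j, k ≤ j → tbl.getD j [] = []) →
    ∀ j : Nat,
      ((ps.foldl (fun (st : List (List Int) × Nat) p =>
          if p.2 = '-' then st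
          else if st.2 < n then (st.1.set st.2 (st.1.getD st.2 [] ++ [p.1]), st.2 + 1)
          else st) (tbl, k)).1).getD j []
      = if j < k then tbl.getD j []
        else if j < n then ((ngP ps)[j - k]?).elim [] (fun p => [p.1]) else [] := by
  intro ps
  induction ps with
  | nil =>
      intro tbl k hlen hk hz j
      rw [List.foldl_nil]
      by_cases hjk : j < k
      · rw [if_pos hjk]
      · rw [if_neg hjk, hz j (by omega)]
        split_ifs <;> simp [ngP]
  | cons p ps ih =>
      intro tbl k hlen hk hz j
      rw [List.foldl_cons]
      by_cases hg : p.2 = '-'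
      · rw [if_pos hg, ih tbl k hlen hk hz j, ngP_cons_gap p ps hg]
      · by_cases hkn : k < n
        · have hset : tbl.set k (tbl.getD k [] ++ [p.1]) = tbl.set k [p.1] := by
            rw [hz k (le_refl k)]; rfl
          rw [if_neg hg, if_pos hkn, hset]
          have hlen' : (tbl.set k [p.1]).length = n := by rw [List.length_set]; exact hlen
          have hz' : ∀ j, k + 1 ≤ j → (tbl.set k [p.1]).getD j [] = [] := by
            intro j hj
            rw [List.getD_eq_getElem?_getD, List.getElem?_set_ne (by omega)]
            rw [← List.getD_eq_getElem?_getD]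
            exact hz j (by omega)
          rw [ih (tbl.set k [p.1]) (k+1) hlen' (by omega) hz' j,
              ngP_cons_nongap p ps hg]
          by_cases hjk : j < k
          · rw [if_pos (by omega : j < k + 1), if_pos hjk]
            rw [List.getD_eq_getElem?_getD, List.getElem?_set_ne (by omega),
                ← List.getD_eq_getElem?_getD]
          · by_cases hje : j = k
            · subst hje
              rw [if_pos (by omega : j < j + 1), if_neg (by omega : ¬ j < j)]
              rw [List.getD_eq_getElem?_getD, List.getElem?_set_self (by omega)]
              simp [hkn]
            · rw [if_neg (by omega : ¬ j < k + 1), if_neg hjk]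
              by_cases hjn : j < n
              · rw [if_pos hjn, if_pos hjn]
                have : j - k = (j - (k+1)) + 1 := by omega
                rw [this, List.getElem?_cons_succ]
              · rw [if_neg hjn, if_neg hjn]
        · rw [if_neg hg, if_neg hkn, ih tbl k hlen hk hz j]
          by_cases hjk : j < k
          · rw [if_pos hjk, if_pos hjk]
          · have hk' : k = n := by omega
            rw [if_neg hjk, if_neg hjk, if_neg (by omega : ¬ j < n),
                if_neg (by omega : ¬ j < n)]

-- coverage increment over one clipped range
theorem covRange (n : Nat) :
    ∀ (k : Nat) (a b : Int) (c : List Int), (b - a).toNat = k → 0 ≤ a → b ≤ (c.length : Int) →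
    ∀ j : Nat,
      ((PySem.List.pyRange a b 1).foldl
        (fun c orig => c.set orig.toNat (c.getD orig.toNat 0 + 1)) c).getD j 0
      = c.getD j 0 + (if a ≤ (j : Int) ∧ (j : Int) < b then 1 else 0) := by
  intro k
  induction k with
  | zero =>
      intro a b c hk ha hb j
      rw [PySem.List.pyRange_one_eq_nil (by omega), List.foldl_nil,
          if_neg (by omega : ¬ (a ≤ (j : Int) ∧ (j : Int) < b))]
      ring
  | succ k ih =>
      intro a b c hk ha hb j
      have hab : a < b := by omega
      rw [PySem.List.pyRange_one_cons hab, List.foldl_cons]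
      have hlt : a.toNat < c.length := by omega
      have hlen' : ((c.set a.toNat (c.getD a.toNat 0 + 1)).length : Int) = (c.length : Int) := by
        rw [List.length_set]
      rw [ih (a+1) b _ (by omega) (by omega) (by rw [hlen']; exact hb) j]
      by_cases hj : (j : Int) = a
      · have hjn : j = a.toNat := by omega
        subst hjn
        rw [List.getD_eq_getElem?_getD, List.getElem?_set_self hlt]
        rw [if_neg (by omega : ¬ (a + 1 ≤ ((a.toNat : Nat) : Int) ∧ ((a.toNat : Nat) : Int) < b)),
            if_pos (by omega : a ≤ ((a.toNat : Nat) : Int) ∧ ((a.toNat : Nat) : Int) < b)]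
        simp [← List.getD_eq_getElem?_getD]
      · have hne : a.toNat ≠ j := by omega
        rw [List.getD_eq_getElem?_getD, List.getElem?_set_ne hne,
            ← List.getD_eq_getElem?_getD]
        have hiff : (a + 1 ≤ (j : Int) ∧ (j : Int) < b) = (a ≤ (j : Int) ∧ (j : Int) < b) := by
          apply propext; constructor <;> intro h <;> exact ⟨by omega, h.2⟩
        simp only [hiff]

theorem covRange_len :
    ∀ (L : List Int) (c : List Int),
      (L.foldl (fun c orig => c.set orig.toNat (c.getD orig.toNat 0 + 1)) c).length = c.length := by
  intro L
  induction L with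
  | nil => intro c; rfl
  | cons x L ih => intro c; rw [List.foldl_cons, ih, List.length_set]

-- full coverage characterization
theorem covAll (n : Nat) :
    ∀ (rs : List (Int × Int)) (c : List Int), c.length = n →
    ∀ j : Nat,
      ((rs.foldl (fun cov r =>
          (PySem.List.pyRange (max 0 r.1) (min (n : Int) r.2) 1).foldl
            (fun c orig => c.set orig.toNat (c.getD orig.toNat 0 + 1)) cov) c)).getD j 0
      = c.getD j 0 + (rs.map (fun r =>
          if max 0 r.1 ≤ (j : Int) ∧ (j : Int) < min (n : Int) r.2 then (1:Int) else 0)).sum := by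
  intro rs
  induction rs with
  | nil => intro c hc j; simp
  | cons r rs ih =>
      intro c hc j
      rw [List.foldl_cons]
      have hc' : ((PySem.List.pyRange (max 0 r.1) (min (n : Int) r.2) 1).foldl
          (fun c orig => c.set orig.toNat (c.getD orig.toNat 0 + 1)) c).length = n := by
        rw [covRange_len]; exact hc
      rw [ih _ hc' j,
          covRange n ((min (n : Int) r.2 - max 0 r.1).toNat) _ _ c rfl (by omega)
            (by rw [hc]; omega) j,
          List.map_cons, List.sum_cons]
      ring

-- the tail of B's scan, as a recursive sum
def restSum (cl : List Char) (cov : List Int) (n : Nat) : Nat → List (Int × Char) → Int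
  | _, [] => 0
  | k, p :: qs =>
      if k < n then
        cov.getD k 0 * (if p.1 < (cl.length : Int) ∧ p.2 ≠ PySem.List.pyGetD cl p.1 ' ' then 1 else 0)
          + restSum cl cov n (k + 1) qs
      else 0

theorem scanB_frozen (cl : List Char) (cov : List Int) (n : Nat) :
    ∀ (ps : List (Int × Char)) (t : Int) (k : Nat), n ≤ k →
      ps.foldl (fun (st : Int × Nat) p =>
        if p.2 = '-' then st
        else if n ≤ st.2 then st
        else if p.1 < (cl.length : Int) ∧ p.2 ≠ PySem.List.pyGetD cl p.1 ' '
             then (st.1 + cov.getD st.2 0, st.2 + 1)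
             else (st.1, st.2 + 1)) (t, k) = (t, k) := by
  intro ps
  induction ps with
  | nil => intro t k _; rfl
  | cons p ps ih =>
      intro t k hk
      rw [List.foldl_cons]
      by_cases hg : p.2 = '-'
      · rw [if_pos hg]; exact ih t k hk
      · rw [if_neg hg, if_pos hk]; exact ih t k hk

theorem scanB (cl : List Char) (cov : List Int) (n : Nat) :
    ∀ (ps : List (Int × Char)) (t : Int) (k : Nat),
      (ps.foldl (fun (st : Int × Nat) p =>
        if p.2 = '-' then st
        else if n ≤ st.2 then st
        else if p.1 < (cl.length : Int) ∧ p.2 ≠ PySem.List.pyGetD cl p.1 ' '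
             then (st.1 + cov.getD st.2 0, st.2 + 1)
             else (st.1, st.2 + 1)) (t, k)).1
      = t + restSum cl cov n k (ngP ps) := by
  intro ps
  induction ps with
  | nil => intro t k; simp [restSum, ngP]
  | cons p ps ih =>
      intro t k
      rw [List.foldl_cons]
      by_cases hg : p.2 = '-'
      · rw [if_pos hg, ih t k, ngP_cons_gap p ps hg]
      · rw [ngP_cons_nongap p ps hg]
        by_cases hnk : n ≤ k
        · rw [if_neg hg, if_pos hnk, scanB_frozen cl cov n ps t k hnk]
          simp [restSum, if_neg (by omega : ¬ k < n)]
        · rw [if_neg hg, if_neg hnk]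
          by_cases hc : p.1 < (cl.length : Int) ∧ p.2 ≠ PySem.List.pyGetD cl p.1 ' '
          · rw [if_pos hc, ih (t + cov.getD k 0) (k + 1)]
            simp only [restSum, if_pos (by omega : k < n), if_pos hc]
            ring
          · rw [if_neg hc, ih t (k + 1)]
            simp only [restSum, if_pos (by omega : k < n), if_neg hc]
            ring

theorem restSum_eq (cl : List Char) (cov : List Int) (n : Nat) :
    ∀ (qs : List (Int × Char)) (k : Nat),
      restSum cl cov n k qs
      = ∑ j ∈ Finset.Ico k n, cov.getD j 0 *
          ((qs[j - k]?).elim 0 (fun p =>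
            if p.1 < (cl.length : Int) ∧ p.2 ≠ PySem.List.pyGetD cl p.1 ' ' then 1 else 0)) := by
  intro qs
  induction qs with
  | nil => intro k; simp [restSum]
  | cons p qs ih =>
      intro k
      by_cases hk : k < n
      · rw [Finset.sum_eq_sum_Ico_succ_bot hk]
        have hrest : ∀ j ∈ Finset.Ico (k+1) n,
            cov.getD j 0 * (((p :: qs)[j - k]?).elim 0 (fun p =>
              if p.1 < (cl.length : Int) ∧ p.2 ≠ PySem.List.pyGetD cl p.1 ' ' then 1 else 0))
            = cov.getD j 0 * ((qs[j - (k+1)]?).elim 0 (fun p =>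
              if p.1 < (cl.length : Int) ∧ p.2 ≠ PySem.List.pyGetD cl p.1 ' ' then 1 else 0)) := by
          intro j hj
          rcases Finset.mem_Ico.mp hj with ⟨h1, _⟩
          have : j - k = (j - (k+1)) + 1 := by omega
          rw [this, List.getElem?_cons_succ]
        rw [Finset.sum_congr rfl hrest, ← ih (k+1)]
        simp [restSum, if_pos hk]
      · rw [Finset.Ico_eq_empty (by omega), Finset.sum_empty]
        simp [restSum, if_neg hk]

theorem sum_map_range (m : Nat) (f : Nat → Int) :
    ((List.range m).map f).sum = ∑ i ∈ Finset.range m, f i := by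
  induction m with
  | zero => simp
  | succ m ih => simp [List.range_succ, Finset.sum_range_succ, ih]

-- per range: indicator sum over range n = sum of g over the clipped pyRange
theorem perRange (n : Nat) (g : Nat → Int) (a b : Int) (ha : 0 ≤ a) (hb : b ≤ (n : Int)) :
    ∑ j ∈ Finset.range n, (if a ≤ (j : Int) ∧ (j : Int) < b then (1:Int) else 0) * g j
    = ((PySem.List.pyRange a b 1).map (fun o => g o.toNat)).sum := by
  have hL : ∀ j ∈ Finset.range n,
      (if a ≤ (j : Int) ∧ (j : Int) < b then (1:Int) else 0) * g j
      = if j ∈ Finset.Ico a.toNat b.toNat then g j else 0 := by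
    intro j hj
    by_cases h : a ≤ (j : Int) ∧ (j : Int) < b
    · rw [if_pos h, one_mul, if_pos (Finset.mem_Ico.mpr ⟨by omega, by omega⟩)]
    · rw [if_neg h, zero_mul, if_neg]
      intro hc
      rcases Finset.mem_Ico.mp hc with ⟨h1, h2⟩
      exact h ⟨by omega, by omega⟩
  have hsub : Finset.Ico a.toNat b.toNat ⊆ Finset.range n := by
    intro j hj
    rcases Finset.mem_Ico.mp hj with ⟨_, h2⟩
    exact Finset.mem_range.mpr (by omega)
  rw [Finset.sum_congr rfl hL, Finset.sum_ite_mem,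
      Finset.inter_eq_right.mpr hsub, Finset.sum_Ico_eq_sum_range,
      PySem.List.pyRange_one, List.map_map, sum_map_range]
  apply Finset.sum_congr (by congr 1; omega)
  intro i hi
  have : ((a + (i : Int)).toNat) = a.toNat + i := by omega
  simp [Function.comp, this]

theorem swapSum (n : Nat) (g : Nat → Int) :
    ∀ rs : List (Int × Int),
      ∑ j ∈ Finset.range n, (rs.map (fun r =>
          if max 0 r.1 ≤ (j : Int) ∧ (j : Int) < min (n : Int) r.2 then (1:Int) else 0)).sum * g j
      = (rs.map (fun r => ((PySem.List.pyRange (max 0 r.1) (min (n : Int) r.2) 1).map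
          (fun o => g o.toNat)).sum)).sum := by
  intro rs
  induction rs with
  | nil => simp
  | cons r rs ih =>
      have : ∀ j ∈ Finset.range n,
          (((r :: rs).map (fun r =>
            if max 0 r.1 ≤ (j : Int) ∧ (j : Int) < min (n : Int) r.2 then (1:Int) else 0)).sum) * g j
          = (if max 0 r.1 ≤ (j : Int) ∧ (j : Int) < min (n : Int) r.2 then (1:Int) else 0) * g j
            + ((rs.map (fun r =>
            if max 0 r.1 ≤ (j : Int) ∧ (j : Int) < min (n : Int) r.2 then (1:Int) else 0)).sum) * g j := by
        intro j hj
        rw [List.map_cons, List.sum_cons, add_mul]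
      rw [Finset.sum_congr rfl this, Finset.sum_add_distrib, ih,
          perRange n g (max 0 r.1) (min (n : Int) r.2) (by omega) (by omega),
          List.map_cons, List.sum_cons]

-- ===== VERDICT (by name: the statement is the Claim_ definition above) =====
theorem compute_segment_alignment_penalty_spec : Claim_equal_compute_segment_alignment_penalty := by
  intro dss das cas rs _
  unfold Spec_compute_segment_alignment_penalty compute_segment_alignment_penalty
    compute_segment_alignment_penalty_alt
  by_cases hrs : rs = []
  · rw [if_pos hrs, if_pos hrs]
  · rw [if_neg hrs, if_neg hrs]
    simp only []
    have htbl : ∀ j : Nat, j < dss.toList.length →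
        ((List.foldl (fun (st : List (List Int) × Nat) p =>
            if p.2 = '-' then st
            else if st.2 < dss.toList.length then (st.1.set st.2 (st.1.getD st.2 [] ++ [p.1]), st.2 + 1)
            else st)
          (List.replicate dss.toList.length ([] : List Int), 0)
          (PySem.List.enumerate das.toList 0)).1).getD j []
        = ((ngP (PySem.List.enumerate das.toList 0))[j]?).elim [] (fun p => [p.1]) := by
      intro j hj
      rw [tblA_char dss.toList.length (PySem.List.enumerate das.toList 0) _ 0
            (by simp) (by omega) (by intro j _; simp) j]
      rw [if_neg (by omega), if_pos hj]
      simp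
    have hA : List.foldl
        (fun mismatches r =>
          List.foldl
            (fun mism orig =>
              List.foldl
                (fun m ai =>
                  if (cas.toList.length : Int) ≤ ai then m
                  else if PySem.List.pyGetD das.toList ai ' ' ≠ PySem.List.pyGetD cas.toList ai ' ' then m + 1 else m)
                mism
                ((List.foldl
                    (fun (st : List (List Int) × Nat) p =>
                      if p.2 = '-' then st
                      else if st.2 < dss.toList.length then (st.1.set st.2 (st.1.getD st.2 [] ++ [p.1]), st.2 + 1)
                      else st)
                    (List.replicate dss.toList.length ([] : List Int), 0)
                    (PySem.List.enumerate das.toList 0)).1.getD orig.toNat []))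
            mismatches (PySem.List.pyRange (max 0 r.1) (min (dss.toList.length : Int) r.2) 1))
        0 rs
        = (rs.map (fun r => ((PySem.List.pyRange (max 0 r.1) (min (dss.toList.length : Int) r.2) 1).map
            (fun o => gOf das.toList cas.toList o.toNat)).sum)).sum := by
      have hinner : ∀ (acc : Int) (r : Int × Int),
          List.foldl
            (fun mism orig =>
              List.foldl
                (fun m ai =>
                  if (cas.toList.length : Int) ≤ ai then m
                  else if PySem.List.pyGetD das.toList ai ' ' ≠ PySem.List.pyGetD cas.toList ai ' ' then m + 1 else m)
                mism
                ((List.foldl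
                    (fun (st : List (List Int) × Nat) p =>
                      if p.2 = '-' then st
                      else if st.2 < dss.toList.length then (st.1.set st.2 (st.1.getD st.2 [] ++ [p.1]), st.2 + 1)
                      else st)
                    (List.replicate dss.toList.length ([] : List Int), 0)
                    (PySem.List.enumerate das.toList 0)).1.getD orig.toNat []))
            acc (PySem.List.pyRange (max 0 r.1) (min (dss.toList.length : Int) r.2) 1)
          = acc + ((PySem.List.pyRange (max 0 r.1) (min (dss.toList.length : Int) r.2) 1).map
              (fun o => gOf das.toList cas.toList o.toNat)).sum := by
        intro acc r
        have hcongr : ∀ (mism : Int) (orig : Int),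
            orig ∈ PySem.List.pyRange (max 0 r.1) (min (dss.toList.length : Int) r.2) 1 →
            List.foldl
              (fun m ai =>
                if (cas.toList.length : Int) ≤ ai then m
                else if PySem.List.pyGetD das.toList ai ' ' ≠ PySem.List.pyGetD cas.toList ai ' ' then m + 1 else m)
              mism
              ((List.foldl
                  (fun (st : List (List Int) × Nat) p =>
                    if p.2 = '-' then st
                    else if st.2 < dss.toList.length then (st.1.set st.2 (st.1.getD st.2 [] ++ [p.1]), st.2 + 1)
                    else st)
                  (List.replicate dss.toList.length ([] : List Int), 0)
                  (PySem.List.enumerate das.toList 0)).1.getD orig.toNat [])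
            = mism + gOf das.toList cas.toList orig.toNat := by
          intro mism orig hmem
          obtain ⟨h1, h2⟩ := PySem.List.mem_pyRange_one.mp hmem
          have hj : orig.toNat < dss.toList.length := by omega
          rw [htbl orig.toNat hj]
          cases hopt : (ngP (PySem.List.enumerate das.toList 0))[orig.toNat]? with
          | none => simp [gOf, hopt]
          | some p =>
              simp only [hopt, Option.elim, List.foldl_cons, List.foldl_nil, gOf, indA]
              split_ifs <;> ring
        exact (PySem.List.foldl_congr_mem _ _
            (fun (mism : Int) (orig : Int) => mism + gOf das.toList cas.toList orig.toNat)
            acc hcongr).trans (PySem.List.foldl_add _ _ acc)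
      have houter : ∀ (acc : Int) (r : Int × Int), r ∈ rs →
          (fun (mismatches : Int) r =>
            List.foldl
              (fun mism orig =>
                List.foldl
                  (fun m ai =>
                    if (cas.toList.length : Int) ≤ ai then m
                    else if PySem.List.pyGetD das.toList ai ' ' ≠ PySem.List.pyGetD cas.toList ai ' ' then m + 1 else m)
                  mism
                  ((List.foldl
                      (fun (st : List (List Int) × Nat) p =>
                        if p.2 = '-' then st
                        else if st.2 < dss.toList.length then (st.1.set st.2 (st.1.getD st.2 [] ++ [p.1]), st.2 + 1)
                        else st)
                      (List.replicate dss.toList.length ([] : List Int), 0)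
                      (PySem.List.enumerate das.toList 0)).1.getD orig.toNat []))
              mismatches (PySem.List.pyRange (max 0 r.1) (min (dss.toList.length : Int) r.2) 1)) acc r
          = acc + ((PySem.List.pyRange (max 0 r.1) (min (dss.toList.length : Int) r.2) 1).map
              (fun o => gOf das.toList cas.toList o.toNat)).sum := by
        intro acc r _
        exact hinner acc r
      exact ((PySem.List.foldl_congr_mem _ _
          (fun (acc : Int) (r : Int × Int) => acc +
            ((PySem.List.pyRange (max 0 r.1) (min (dss.toList.length : Int) r.2) 1).map
              (fun o => gOf das.toList cas.toList o.toNat)).sum)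
          0 houter).trans (PySem.List.foldl_add _ _ 0)).trans (zero_add _)
    rw [hA]
    rw [scanB cas.toList _ dss.toList.length (PySem.List.enumerate das.toList 0) 0 0,
        restSum_eq, zero_add, ← Finset.range_eq_Ico]
    rw [← swapSum dss.toList.length (gOf das.toList cas.toList) rs]
    apply Finset.sum_congr rfl
    intro j hj
    have hjn : j < dss.toList.length := Finset.mem_range.mp hj
    have hcov :
        (List.foldl
          (fun cov r =>
            List.foldl (fun c orig => c.set orig.toNat (c.getD orig.toNat 0 + 1)) cov
              (PySem.List.pyRange (max 0 r.1) (min (dss.toList.length : Int) r.2) 1))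
          (List.replicate dss.toList.length (0 : Int)) rs).getD j 0
        = (rs.map (fun r =>
            if max 0 r.1 ≤ (j : Int) ∧ (j : Int) < min ((dss.toList.length : Int)) r.2 then (1:Int) else 0)).sum := by
      rw [covAll dss.toList.length rs _ (by simp) j]
      simp
    rw [Nat.sub_zero, hcov]
    congr 1
    cases hopt : (ngP (PySem.List.enumerate das.toList 0))[j]? with
    | none => simp [gOf, hopt]
    | some p =>
        have hmem : p ∈ PySem.List.enumerate das.toList 0 :=
          mem_ngP (List.mem_of_getElem? hopt)
        have hget := pyGetD_enumerate hmem
        simp only [gOf, hopt, Option.elim, indA]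
        rw [hget]
        by_cases hlen : p.1 < (cas.toList.length : Int)
        · rw [if_neg (by omega)]
          by_cases hne : p.2 ≠ PySem.List.pyGetD cas.toList p.1 ' '
          · rw [if_pos hne, if_pos ⟨hlen, hne⟩]
          · rw [if_neg hne, if_neg (by tauto)]
        · rw [if_pos (by omega), if_neg (by tauto)]
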